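-- pv_equiv track=rewrite | github.com/portwebdesign/code-graph-rag | codebase_rag/parsers/import_processor.py | _split_scala_import_entries
-- ===== SOURCE A (Python) =====
-- def _split_scala_import_entries(import_text: str) -> list[str]:
--     """
--     Split a Scala import statement into individual entries.
--
--     Args:
--         import_text (str): The raw import text.
--
--     Returns:
--         list[str]: list of individual import strings.
--     """
--     if not import_text:
--         return []
--     text = import_text.strip()
--     if text.startswith("import "):
--         text = text[len("import ") :].strip()
--
--     entries: list[str] = []
--     buffer: list[str] = []
--     depth = 0
--
--     for ch in text:
--         if ch == "{":
--             depth += 1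
--         elif ch == "}":
--             depth = max(depth - 1, 0)
--
--         if ch == "," and depth == 0:
--             entry = "".join(buffer).strip()
--             if entry:
--                 entries.append(entry)
--             buffer = []
--             continue
--         buffer.append(ch)
--
--     tail = "".join(buffer).strip()
--     if tail:
--         entries.append(tail)
--
--     return entries
-- ===== SOURCE B (Python) =====
-- def _segments(text):
--     """Split text at top-level (brace-depth-0) commas into raw segments."""
--     depth = 0
--     for i, ch in enumerate(text):
--         if ch == "{":
--             depth += 1
--         elif ch == "}":
--             depth = max(depth - 1, 0)
--         if ch == "," and depth == 0:
--             return [text[:i]] + _segments(text[i + 1:])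
--     return [text]
--
--
-- def _split_scala_import_entries(import_text: str) -> list[str]:
--     if not import_text:
--         return []
--     text = import_text.strip()
--     if text.startswith("import "):
--         text = text[len("import "):].strip()
--     return [e for e in (seg.strip() for seg in _segments(text)) if e]
-- ===== Notes on version B (the rewrite author's own statement) =====
-- stated objective: alternative
-- what changed: Replaces A's single fold that interleaves depth tracking, buffer building and entry emission with a recursive segment splitter (find the first depth-0 comma, slice, recurse) followed by a separate strip-and-filter comprehension over the raw segments.
import Mathlib
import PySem

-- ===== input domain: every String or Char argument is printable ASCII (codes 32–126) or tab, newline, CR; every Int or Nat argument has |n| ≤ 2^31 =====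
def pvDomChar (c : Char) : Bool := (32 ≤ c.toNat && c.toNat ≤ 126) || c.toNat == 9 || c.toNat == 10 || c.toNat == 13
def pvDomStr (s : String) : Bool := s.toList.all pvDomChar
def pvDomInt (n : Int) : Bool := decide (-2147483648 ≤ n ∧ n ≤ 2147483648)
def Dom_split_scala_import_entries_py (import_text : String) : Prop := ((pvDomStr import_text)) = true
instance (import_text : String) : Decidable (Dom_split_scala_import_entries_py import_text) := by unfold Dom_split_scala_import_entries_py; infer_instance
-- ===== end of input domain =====

-- B replaces A's single fold (buffer + depth + eager entry emission) by a recursive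
-- depth-0-comma segment splitter followed by a separate strip-and-filter pass; same cost.

-- ===== PORT A =====
-- one step of A's for-loop: state = (entries, buffer, depth)
def pvStepA (s : List String × List Char × Int) (ch : Char) :
    List String × List Char × Int :=
  let depth : Int :=
    if ch = '{' then s.2.2 + 1
    else if ch = '}' then max (s.2.2 - 1) 0
    else s.2.2
  if ch = ',' ∧ depth = 0 then
    let entry := PySem.Chars.strip s.2.1
    (if entry ≠ [] then s.1 ++ [String.ofList entry] else s.1, [], depth)
  else
    (s.1, s.2.1 ++ [ch], depth)

def split_scala_import_entries_py (import_text : String) : List String :=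
  if import_text = "" then []
  else
    let text := PySem.Chars.strip import_text.toList
    let text :=
      if PySem.Chars.startswith text "import ".toList then
        PySem.Chars.strip (PySem.Chars.slice text (some 7) none)
      else text
    let st := text.foldl pvStepA ([], [], 0)
    let tail := PySem.Chars.strip st.2.1
    if tail ≠ [] then st.1 ++ [String.ofList tail] else st.1

-- ===== PORT B =====
-- the enumerate loop of _segments: scan rest keeping the scanned prefix (= text[:i]) and depth;
-- returns (text[:i], text[i+1:]) at the first depth-0 comma, none if there is no such comma
def pvFindB (depth : Int) (pre rest : List Char) : Option (List Char × List Char) :=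
  match rest with
  | [] => none
  | c :: rs =>
    if c = ',' ∧ (if c = '{' then depth + 1 else if c = '}' then max (depth - 1) 0 else depth) = 0
    then some (pre, rs)
    else pvFindB (if c = '{' then depth + 1 else if c = '}' then max (depth - 1) 0 else depth)
      (pre ++ [c]) rs

theorem pvFindB_length (depth : Int) (pre rest : List Char) (a b : List Char)
    (h : pvFindB depth pre rest = some (a, b)) : b.length < rest.length := by
  induction rest generalizing depth pre with
  | nil => rw [pvFindB] at h; simp at h
  | cons c rs ih =>
    by_cases hc : c = ',' ∧
        (if c = '{' then depth + 1 else if c = '}' then max (depth - 1) 0 else depth) = 0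
    · rw [pvFindB, if_pos hc] at h
      simp only [Option.some.injEq, Prod.mk.injEq] at h
      simp [← h.2]
    · rw [pvFindB, if_neg hc] at h
      exact Nat.lt_succ_of_lt (ih _ _ h)

-- _segments
def pvSegsB (cs : List Char) : List (List Char) :=
  match h : pvFindB 0 [] cs with
  | some (a, b) => a :: pvSegsB b
  | none => [cs]
termination_by cs.length
decreasing_by exact pvFindB_length _ _ _ _ _ h

def split_scala_import_entries_py_alt (import_text : String) : List String :=
  if import_text = "" then []
  else
    let text := PySem.Chars.strip import_text.toList
    let text :=
      if PySem.Chars.startswith text "import ".toList then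
        PySem.Chars.strip (PySem.Chars.slice text (some 7) none)
      else text
    (((pvSegsB text).map (fun seg => PySem.Chars.strip seg)).filter
        (fun e => e ≠ [])).map String.ofList

-- ===== PRECONDITION & SPEC =====
def Spec_split_scala_import_entries_py (import_text : String) (out : List String) : Prop := out = split_scala_import_entries_py_alt import_text
instance (import_text : String) (out : List String) : Decidable (Spec_split_scala_import_entries_py import_text out) := by unfold Spec_split_scala_import_entries_py; infer_instance

-- ===== CLAIM (what is proved, stated in full; the proofs are below) =====
def Claim_equal_split_scala_import_entries_py : Prop := ∀ (import_text : String), Dom_split_scala_import_entries_py import_text → Spec_split_scala_import_entries_py import_text (split_scala_import_entries_py import_text)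

-- ===== LEMMAS AND PROOFS =====

-- the segments of cs when the scan starts at depth d with accumulated prefix pre
def pvSegsFrom (d : Int) (pre cs : List Char) : List (List Char) :=
  match pvFindB d pre cs with
  | some (a, b) => a :: pvSegsB b
  | none => [pre ++ cs]

-- B's post-processing of the raw segments
def pvPost (l : List (List Char)) : List String :=
  ((l.map (fun seg => PySem.Chars.strip seg)).filter (fun e => e ≠ [])).map String.ofList

theorem pvPost_cons (s : List Char) (l : List (List Char)) :
    pvPost (s :: l) =
      (if PySem.Chars.strip s ≠ [] then [String.ofList (PySem.Chars.strip s)] else []) ++ pvPost l := by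
  simp only [pvPost, List.map_cons, List.filter]
  split_ifs with h
  · simp [h]
  · simp at h; simp [h]

theorem pvSegsB_eq_from (cs : List Char) : pvSegsB cs = pvSegsFrom 0 [] cs := by
  rw [pvSegsB.eq_def, pvSegsFrom]
  cases pvFindB 0 [] cs with
  | none => simp
  | some p => rfl

-- A's tail handling
def pvFinishA (s : List String × List Char × Int) : List String :=
  let tail := PySem.Chars.strip s.2.1
  if tail ≠ [] then s.1 ++ [String.ofList tail] else s.1

theorem pvMain (cs : List Char) : ∀ (d : Int) (pre : List Char) (entries : List String),
    pvFinishA (cs.foldl pvStepA (entries, pre, d))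
      = entries ++ pvPost (pvSegsFrom d pre cs) := by
  induction cs with
  | nil =>
    intro d pre entries
    have hseg : pvSegsFrom d pre [] = [pre] := by simp [pvSegsFrom, pvFindB]
    rw [List.foldl_nil, hseg, pvPost_cons]
    simp only [pvFinishA, pvPost, List.map_nil, List.filter_nil, List.append_nil]
    split_ifs with h <;> simp
  | cons c rs ih =>
    intro d pre entries
    rw [List.foldl_cons]
    by_cases hcomma : c = ',' ∧
        (if c = '{' then d + 1 else if c = '}' then max (d - 1) 0 else d) = 0
    · obtain ⟨hc, hd0⟩ := hcomma
      subst hc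
      have hd : d = 0 := by simpa using hd0
      subst hd
      have hstep : pvStepA (entries, pre, (0 : Int)) ',' =
          ((if PySem.Chars.strip pre ≠ [] then entries ++ [String.ofList (PySem.Chars.strip pre)]
            else entries), [], 0) := by
        simp [pvStepA]
      rw [hstep, ih]
      have hseg : pvSegsFrom 0 pre (',' :: rs) = pre :: pvSegsB rs := by
        simp [pvSegsFrom, pvFindB]
      rw [hseg, pvPost_cons, ← pvSegsB_eq_from]
      split_ifs with h <;> simp
    · have hstep : pvStepA (entries, pre, d) c =
          (entries, pre ++ [c],
            (if c = '{' then d + 1 else if c = '}' then max (d - 1) 0 else d)) := by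
        simp only [pvStepA]
        rw [if_neg hcomma]
      rw [hstep, ih]
      congr 2
      unfold pvSegsFrom
      rw [show pvFindB d pre (c :: rs)
            = pvFindB (if c = '{' then d + 1 else if c = '}' then max (d - 1) 0 else d)
                (pre ++ [c]) rs from by
          simp only [pvFindB]; rw [if_neg hcomma]]
      cases pvFindB (if c = '{' then d + 1 else if c = '}' then max (d - 1) 0 else d)
          (pre ++ [c]) rs with
      | none => simp
      | some p => rfl

-- ===== VERDICT (by name: the statement is the Claim_ definition above) =====
theorem split_scala_import_entries_py_spec : Claim_equal_split_scala_import_entries_py := by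
  intro import_text _
  unfold Spec_split_scala_import_entries_py split_scala_import_entries_py split_scala_import_entries_py_alt
  split_ifs with h
  · rfl
  · have := pvMain
      (if PySem.Chars.startswith (PySem.Chars.strip import_text.toList) "import ".toList then
        PySem.Chars.strip (PySem.Chars.slice (PySem.Chars.strip import_text.toList) (some 7) none)
      else PySem.Chars.strip import_text.toList) 0 [] []
    simp only [List.nil_append] at this
    simpa [pvFinishA, pvPost, pvSegsB_eq_from] using this
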